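-- pv_equiv track=rewrite | github.com/awslabs/fever | src/dataset/reader/recursive.py | recursive_clean
-- ===== SOURCE A (Python) =====
-- from enum import Enum, auto
--
-- class States(Enum):
--     OUTSIDE = auto()
--     IN_FILE = auto()
--     IN_SQ = auto()
--     ACCEPT = auto()
--
-- def try_accept(text, query):
--     try:
--         pos = text.index(query)
--         return text[pos + len(query):], query, text[:pos]
--     except ValueError:
--         return False, None, None
--
-- def accept(text, *query):
--     if len(query) == 1:
--         return try_accept(text, query[0])
--
--     results = dict()
--     for q in query:
--         results[q] = try_accept(text, q)
--
--     minlen = float("inf")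
--     shortest = None
--     last = None
--     for result in results:
--         last = results[result]
--         if results[result][2] is not None and len(results[result][2]) < minlen:
--             minlen = len(results[result][2])
--             shortest = results[result]
--     return shortest if shortest is not None else last
--
-- def recursive_clean(text,begin,end,pre=None):
--     state = [States.OUTSIDE]
--     ret = ""
--     if pre is None or len(pre) == 0:
--         pre = begin
--
--     while state[-1] is not States.ACCEPT:
--         if len(state) == 0:
--             ret += text
--             state.append(States.ACCEPT)
--             break
--
--         elif state[-1] == States.OUTSIDE:
--             accept_result, _, before = accept(text, *pre)
--
--             if accept_result == False:
--                 ret += text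
--                 state.append(States.ACCEPT)
--             else:
--                 ret += before
--                 text = accept_result
--                 state.append(States.IN_SQ)
--
--         elif state[-1] == States.IN_SQ:
--             accept_result, accepted, before = accept(text, *begin, *end)
--             if accept_result == False:
--                 # parse error
--                 return ret + text
--             else:
--                 if accepted in begin:
--                     text = accept_result
--                     state.append(States.IN_SQ)
--                 elif accepted in end:
--                     text = accept_result
--                     state.pop()
--
--     return ret
-- ===== SOURCE B (Python) =====
-- def recursive_clean(text, begin, end, pre=None):
--     if pre is None or len(pre) == 0:
--         pre = begin
--     n = len(text)
--     bb = list(begin) + list(end)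
--     bset = set(begin)
--     nxt = {}
--
--     def earliest(i, qs):
--         # earliest occurrence position >= i among qs (ties: first in qs);
--         # cached next-occurrence per marker, recomputed only when stale
--         best = n + 1
--         bestq = None
--         for q in qs:
--             p = nxt.get(q, -1)
--             if p < i:
--                 p = text.find(q, i)
--                 if p < 0:
--                     p = n + 1
--                 nxt[q] = p
--             if p < best:
--                 best = p
--                 bestq = q
--         return best, bestq
--
--     out = []
--     i = 0
--     depth = 0
--     while True:
--         if depth == 0:
--             p, q = earliest(i, pre)
--             if p > n:
--                 out.append(text[i:])
--                 return "".join(out)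
--             out.append(text[i:p])
--             i = p + len(q)
--             depth = 1
--         else:
--             p, q = earliest(i, bb)
--             if p > n:
--                 return "".join(out) + text[i:]
--             if q in bset:
--                 depth += 1
--             else:
--                 depth -= 1
--             i = p + len(q)
-- ===== Notes on version B (the rewrite author's own statement) =====
-- stated objective: faster
-- what changed: Replaces A's stack-of-states machine, which re-slices the text and re-runs str.index for every marker on every event, by a single index-driven scan with a depth counter and a per-marker cache of next-occurrence positions recomputed only when stale, so each marker's occurrences are searched once overall.
-- outside the precondition, e.g. on recursive_clean('xz', ['a'], [''], ['x']): A returns 'z', B returns 'z'; on recursive_clean('z', ['a'], ['b'], ['']): A returns 'z', B returns 'z'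
import Mathlib
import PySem

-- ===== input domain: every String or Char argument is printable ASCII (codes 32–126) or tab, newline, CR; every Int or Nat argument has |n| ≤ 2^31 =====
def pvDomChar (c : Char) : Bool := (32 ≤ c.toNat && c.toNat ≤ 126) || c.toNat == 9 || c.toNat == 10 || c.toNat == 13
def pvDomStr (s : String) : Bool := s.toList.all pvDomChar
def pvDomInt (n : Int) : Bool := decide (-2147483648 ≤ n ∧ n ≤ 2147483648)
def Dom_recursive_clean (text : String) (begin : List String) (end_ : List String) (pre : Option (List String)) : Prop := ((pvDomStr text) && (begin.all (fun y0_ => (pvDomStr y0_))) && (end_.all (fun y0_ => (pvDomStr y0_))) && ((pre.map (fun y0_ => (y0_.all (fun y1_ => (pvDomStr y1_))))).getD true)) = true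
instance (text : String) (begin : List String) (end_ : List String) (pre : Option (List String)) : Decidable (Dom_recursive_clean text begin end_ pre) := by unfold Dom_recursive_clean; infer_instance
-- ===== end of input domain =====

-- B replaces A's stack-of-states machine that re-searches every marker in the re-sliced text
-- on every step by a single index-driven scan with a per-marker cache of next occurrences
-- (objective: faster; equivalence is about the return value, neither program mutates its arguments).

-- shared transliteration of the parameter defaulting `if pre is None or len(pre) == 0: pre = begin`
def pvEffPre (begin : List String) (pre : Option (List String)) : List String :=
  match pre with
  | none => begin
  | some ps => if ps.length = 0 then begin else ps

-- ===== PORT A =====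
inductive PyStates where
  | OUTSIDE | IN_FILE | IN_SQ | ACCEPT
deriving DecidableEq, Repr

-- try_accept: text.index raises ValueError exactly when find = -1
def pvTryAccept (t q : List Char) : Option (List Char × List Char × List Char) :=
  let pos := PySem.Chars.find t q
  if pos = -1 then none
  else some (PySem.List.slice t (some (pos + (q.length : Int))) none, q, PySem.List.slice t none (some pos))

-- one step of accept's min-scan over results.items: state = (minlen (none = inf), shortest, last)
def pvAcceptStep
    (st : Option Nat × Option (Option (List Char × List Char × List Char)) × Option (Option (List Char × List Char × List Char)))
    (kv : List Char × Option (List Char × List Char × List Char)) :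
    Option Nat × Option (Option (List Char × List Char × List Char)) × Option (Option (List Char × List Char × List Char)) :=
  match kv.2 with
  | none => (st.1, st.2.1, some kv.2)
  | some tr =>
    match st.1 with
    | none => (some tr.2.2.length, some (some tr), some (some tr))
    | some m =>
      if tr.2.2.length < m then (some tr.2.2.length, some (some tr), some (some tr))
      else (st.1, st.2.1, some (some tr))

-- accept: outer `none` = Python returned None (caller's unpacking raises TypeError)
def pvAccept (t : List Char) (query : List (List Char)) :
    Option (Option (List Char × List Char × List Char)) :=
  match query with
  | [q] => some (pvTryAccept t q)
  | _ =>
    let results := query.foldl (fun d q => d.insert q (pvTryAccept t q)) PySem.Dict.empty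
    let st := results.items.foldl pvAcceptStep (none, none, none)
    match st.2.1 with
    | some v => some v
    | none => st.2.2

-- the while-loop; fuel only bounds the iteration count (with nonempty markers each
-- iteration consumes text, so fuel = len(text)+2 is never exhausted under Pre_)
def pvALoop (preL beginL endL : List (List Char)) :
    Nat → List Char → List PyStates → List Char → List Char
  | 0, t, _, ret => ret ++ t
  | fuel + 1, t, state, ret =>
    match state.getLast? with
    | none => ret                      -- Python would raise IndexError at state[-1]; unreachable
    | some PyStates.ACCEPT => ret
    | some PyStates.OUTSIDE =>
      match pvAccept t preL with
      | none => ret ++ t               -- Python raises TypeError here; outside Pre_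
      | some none => pvALoop preL beginL endL fuel t (state ++ [PyStates.ACCEPT]) (ret ++ t)
      | some (some (rest, _, before)) =>
        pvALoop preL beginL endL fuel rest (state ++ [PyStates.IN_SQ]) (ret ++ before)
    | some PyStates.IN_SQ =>
      match pvAccept t (beginL ++ endL) with
      | none => ret ++ t               -- Python raises TypeError here; outside Pre_
      | some none => ret ++ t          -- parse error: return ret + text
      | some (some (rest, accepted, _)) =>
        if accepted ∈ beginL then
          pvALoop preL beginL endL fuel rest (state ++ [PyStates.IN_SQ]) ret
        else if accepted ∈ endL then
          pvALoop preL beginL endL fuel rest state.dropLast ret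
        else pvALoop preL beginL endL fuel t state ret   -- dead: accepted ∈ begin ++ end
    | some PyStates.IN_FILE => pvALoop preL beginL endL fuel t state ret  -- dead state

def recursive_clean (text : String) (begin : List String) (end_ : List String) (pre : Option (List String)) : String :=
  let t := text.toList
  String.ofList (pvALoop ((pvEffPre begin pre).map String.toList) (begin.map String.toList)
    (end_.map String.toList) (t.length + 2) t [PyStates.OUTSIDE] [])

-- ===== PORT B =====
-- cached `nxt.get(q, -1)` / recompute-if-stale `text.find(q, i)` step of `earliest`
def pvFindNext (t : List Char) (n : Nat) (nxt : PySem.Dict (List Char) Int) (i : Int) (q : List Char) :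
    Int × PySem.Dict (List Char) Int :=
  let p := nxt.getD q (-1)
  if p < i then
    let p1 := PySem.Chars.findFrom t q i none
    let p2 := if p1 < 0 then (n : Int) + 1 else p1
    (p2, nxt.insert q p2)
  else (p, nxt)

-- earliest(i, qs): fold over qs keeping (cache, best, bestq)
def pvEarliest (t : List Char) (n : Nat) (i : Int) (qs : List (List Char))
    (nxt : PySem.Dict (List Char) Int) :
    PySem.Dict (List Char) Int × Int × Option (List Char) :=
  qs.foldl (fun st q =>
    let (nxt, best, bestq) := st
    let (p, nxt') := pvFindNext t n nxt i q
    if p < best then (nxt', p, some q) else (nxt', best, bestq))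
    (nxt, (n : Int) + 1, none)

-- the main `while True` scan; fuel = len(text)+2 is never exhausted under Pre_
def pvBLoop (t : List Char) (n : Nat) (preL bbL : List (List Char)) (bset : PySem.Set (List Char)) :
    Nat → Int → Nat → PySem.Dict (List Char) Int → List Char → List Char
  | 0, i, _, _, out => out ++ PySem.List.slice t (some i) none
  | fuel + 1, i, depth, nxt, out =>
    if depth = 0 then
      let (nxt', p, q?) := pvEarliest t n i preL nxt
      if (n : Int) < p then out ++ PySem.List.slice t (some i) none
      else
        match q? with
        | none => out                 -- dead: p ≤ n means some marker was found
        | some q =>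
          pvBLoop t n preL bbL bset fuel (p + (q.length : Int)) 1 nxt'
            (out ++ PySem.List.slice t (some i) (some p))
    else
      let (nxt', p, q?) := pvEarliest t n i bbL nxt
      if (n : Int) < p then out ++ PySem.List.slice t (some i) none
      else
        match q? with
        | none => out                 -- dead
        | some q =>
          pvBLoop t n preL bbL bset fuel (p + (q.length : Int))
            (if PySem.Set.contains bset q then depth + 1 else depth - 1) nxt' out

def recursive_clean_alt (text : String) (begin : List String) (end_ : List String) (pre : Option (List String)) : String :=
  let t := text.toList
  let n := t.length
  let beginL := begin.map String.toList
  let bbL := beginL ++ end_.map String.toList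
  let bset := PySem.Set.ofList beginL
  String.ofList (pvBLoop t n ((pvEffPre begin pre).map String.toList) bbL bset (n + 2) 0 0 PySem.Dict.empty [])

-- ===== PRECONDITION & SPEC =====
-- Pre_ admits every input whose text contains no effective opening marker (A returns the
-- text unchanged) and every input with nonempty marker strings and a nonempty begin+end
-- list; it excludes the degenerate configurations on which A crashes with a TypeError (no
-- effective opening markers at all, or an opened region with begin+end empty) or can loop
-- forever (a reachable empty-string marker) — on a few such inputs a run with an
-- empty-string marker still terminates and A returns a value, and B returns the same there.
def Pre_recursive_clean (text : String) (begin : List String) (end_ : List String) (pre : Option (List String)) : Prop :=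
  pvEffPre begin pre ≠ [] ∧
  ((∀ s ∈ pvEffPre begin pre, PySem.Str.isIn s text = false) ∨
   (begin ++ end_ ≠ [] ∧
    (∀ s ∈ begin, s ≠ "") ∧ (∀ s ∈ end_, s ≠ "") ∧ (∀ s ∈ pvEffPre begin pre, s ≠ "")))
instance (text : String) (begin : List String) (end_ : List String) (pre : Option (List String)) : Decidable (Pre_recursive_clean text begin end_ pre) := by unfold Pre_recursive_clean; infer_instance

def pvWitness_recursive_clean : String × List String × List String × Option (List String) :=
  ("a[b]c", ["["], ["]"], none)

def Spec_recursive_clean (text : String) (begin : List String) (end_ : List String) (pre : Option (List String)) (out : String) : Prop := out = recursive_clean_alt text begin end_ pre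
instance (text : String) (begin : List String) (end_ : List String) (pre : Option (List String)) (out : String) : Decidable (Spec_recursive_clean text begin end_ pre out) := by unfold Spec_recursive_clean; infer_instance

-- ===== CLAIM (what is proved, stated in full; the proofs are below) =====
def Claim_equal_recursive_clean : Prop := ∀ (text : String) (begin : List String) (end_ : List String) (pre : Option (List String)), Dom_recursive_clean text begin end_ pre → Pre_recursive_clean text begin end_ pre → Spec_recursive_clean text begin end_ pre (recursive_clean text begin end_ pre)


-- ===== LEMMAS AND PROOFS =====

-- ---- first-occurrence primitives (proof-side characterizations of find/findFrom) ----

/-- first occurrence of `q` in `t` at a position `≥ i` (via Python's `find`), as an `Option Nat`. -/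
def pvFoF (t : List Char) (i : Nat) (q : List Char) : Option Nat :=
  let r := PySem.Chars.findFrom t q (i : Int)
  if r < 0 then none else some r.toNat

def pvFo (t q : List Char) : Option Nat := pvFoF t 0 q

theorem pvFoF_none_iff (t q : List Char) (i : Nat) (hi : i ≤ t.length) :
    pvFoF t i q = none ↔ ∀ j, i ≤ j → ¬ q <+: t.drop j := by
  unfold pvFoF
  constructor
  · intro h j hij hpre
    by_cases hr : PySem.Chars.findFrom t q (i : Int) none < 0
    · have h1 : PySem.Chars.findFrom t q (i : Int) none = -1 := by
        by_contra hne
        have := (PySem.Chars.findFrom_natCast_spec t q i hi hne).1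
        omega
      rw [PySem.Chars.findFrom_natCast_eq_neg_one_iff t q i hi] at h1
      apply h1
      have hd : t.drop j = (t.drop i).drop (j - i) := by
        rw [List.drop_drop]; congr 1; omega
      rw [hd] at hpre
      exact hpre.isInfix.trans (List.drop_suffix _ _).isInfix
    · simp [hr] at h
  · intro h
    by_cases hr : PySem.Chars.findFrom t q (i : Int) none < 0
    · simp [hr]
    · exfalso
      have hne : PySem.Chars.findFrom t q (i : Int) none ≠ -1 := by omega
      obtain ⟨h1, h2, _⟩ := PySem.Chars.findFrom_natCast_spec t q i hi hne
      exact h _ (by omega) h2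

theorem pvFoF_some_spec (t q : List Char) (i m : Nat) (hi : i ≤ t.length)
    (h : pvFoF t i q = some m) :
    i ≤ m ∧ q <+: t.drop m ∧ ∀ j, i ≤ j → j < m → ¬ q <+: t.drop j := by
  unfold pvFoF at h
  by_cases hr : PySem.Chars.findFrom t q (i : Int) none < 0
  · simp [hr] at h
  · simp [hr] at h
    have hne : PySem.Chars.findFrom t q (i : Int) none ≠ -1 := by omega
    obtain ⟨h1, h2, h3⟩ := PySem.Chars.findFrom_natCast_spec t q i hi hne
    subst h
    exact ⟨by omega, h2, fun j hij hj => h3 j hij hj⟩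

theorem pvFoF_some_iff (t q : List Char) (i m : Nat) (hi : i ≤ t.length) :
    pvFoF t i q = some m ↔
      i ≤ m ∧ q <+: t.drop m ∧ ∀ j, i ≤ j → j < m → ¬ q <+: t.drop j := by
  constructor
  · exact pvFoF_some_spec t q i m hi
  · rintro ⟨him, hm, hmin⟩
    have hne : pvFoF t i q ≠ none := by
      intro hcon
      exact ((pvFoF_none_iff t q i hi).mp hcon) m him hm
    cases hfo : pvFoF t i q with
    | none => exact absurd hfo hne
    | some m' =>
      obtain ⟨him', hm', hmin'⟩ := pvFoF_some_spec t q i m' hi hfo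
      congr
      rcases lt_trichotomy m' m with h | h | h
      · exact absurd hm' (hmin m' him' h)
      · exact h
      · exact absurd hm (hmin' m him h)

theorem pvFo_some_iff (t q : List Char) (m : Nat) :
    pvFo t q = some m ↔ q <+: t.drop m ∧ ∀ j, j < m → ¬ q <+: t.drop j := by
  rw [pvFo, pvFoF_some_iff t q 0 m (Nat.zero_le _)]
  constructor
  · rintro ⟨_, h2, h3⟩; exact ⟨h2, fun j hj => h3 j (Nat.zero_le _) hj⟩
  · rintro ⟨h2, h3⟩; exact ⟨Nat.zero_le _, h2, fun j _ hj => h3 j hj⟩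

theorem pvFo_none_iff (t q : List Char) :
    pvFo t q = none ↔ ∀ j, ¬ q <+: t.drop j := by
  rw [pvFo, pvFoF_none_iff t q 0 (Nat.zero_le _)]
  exact ⟨fun h j => h j (Nat.zero_le _), fun h j _ => h j⟩

theorem pvFo_le (t q : List Char) (p : Nat) (h : pvFo t q = some p) :
    p + q.length ≤ t.length := by
  obtain ⟨hp, hmin⟩ := (pvFo_some_iff t q p).mp h
  have hple : p ≤ t.length := by
    by_contra hgt
    have hnil : t.drop p = [] := List.drop_eq_nil_of_le (by omega)
    have hq : q = [] := List.prefix_nil.mp (hnil ▸ hp)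
    exact hmin 0 (by omega) (hq ▸ List.nil_prefix)
  have := hp.length_le
  rw [List.length_drop] at this
  omega

theorem pvFoF_drop (t q : List Char) (i : Nat) (hi : i ≤ t.length) :
    pvFoF t i q = (pvFo (t.drop i) q).map (· + i) := by
  cases h : pvFo (t.drop i) q with
  | none =>
    simp only [Option.map_none]
    rw [pvFoF_none_iff t q i hi]
    rw [pvFo_none_iff] at h
    intro j hij hpre
    apply h (j - i)
    rw [List.drop_drop, show i + (j - i) = j from by omega]
    exact hpre
  | some m =>
    obtain ⟨hm, hmin⟩ := (pvFo_some_iff (t.drop i) q m).mp h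
    simp only [Option.map_some]
    rw [pvFoF_some_iff t q i (m + i) hi]
    refine ⟨by omega, ?_, ?_⟩
    · rw [show t.drop (m + i) = (t.drop i).drop m from by rw [List.drop_drop, Nat.add_comm]]
      exact hm
    · intro j hij hj hpre
      apply hmin (j - i) (by omega)
      rw [List.drop_drop, show i + (j - i) = j from by omega]
      exact hpre

-- ---- earliest-marker selection (the common mathematical content of both programs) ----

def pvEmStep (t : List Char) (acc : Option (Nat × List Char)) (q : List Char) :
    Option (Nat × List Char) :=
  match pvFo t q with
  | none => acc
  | some p =>
    match acc with
    | none => some (p, q)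
    | some pr => if p < pr.1 then some (p, q) else acc

def pvEm (t : List Char) (qs : List (List Char)) : Option (Nat × List Char) :=
  qs.foldl (pvEmStep t) none

def PvEmOk (t : List Char) (qs : List (List Char)) : Option (Nat × List Char) → Prop
  | none => ∀ q ∈ qs, pvFo t q = none
  | some (p, q) =>
      (∀ q' ∈ qs, ∀ p', pvFo t q' = some p' → p ≤ p') ∧
      qs.find? (fun x => pvFo t x == some p) = some q

theorem pvEm_ok (t : List Char) (qs : List (List Char)) : PvEmOk t qs (pvEm t qs) := by
  induction qs using List.reverseRecOn with
  | nil => intro q hq; simp at hq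
  | append_singleton L x ih =>
    unfold pvEm at ih ⊢
    rw [List.foldl_append, List.foldl_cons, List.foldl_nil]
    cases hL : L.foldl (pvEmStep t) none with
    | none =>
      rw [hL] at ih
      unfold pvEmStep
      cases hx : pvFo t x with
      | none =>
        intro q hq
        rcases List.mem_append.mp hq with h | h
        · exact ih q h
        · simp at h; subst h; exact hx
      | some p =>
        refine ⟨?_, ?_⟩
        · intro q' hq' p' hp'
          rcases List.mem_append.mp hq' with h | h
          · exact absurd hp' (by rw [ih q' h]; simp)
          · simp at h; subst h; rw [hx] at hp'; injection hp' with h'; omega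
        · rw [List.find?_append]
          have h1 : L.find? (fun y => pvFo t y == some p) = none := by
            rw [List.find?_eq_none]
            intro y hy
            simp [ih y hy]
          rw [h1]
          simp [hx]
    | some pr =>
      obtain ⟨p', q'⟩ := pr
      rw [hL] at ih
      obtain ⟨ihmin, ihfind⟩ := ih
      unfold pvEmStep
      cases hx : pvFo t x with
      | none =>
        refine ⟨?_, ?_⟩
        · intro y hy py hpy
          rcases List.mem_append.mp hy with h | h
          · exact ihmin y h py hpy
          · simp at h; subst h; rw [hx] at hpy; cases hpy
        · rw [List.find?_append, ihfind]; rfl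
      | some p =>
        by_cases hlt : p < p'
        · simp only [hlt, if_pos]
          refine ⟨?_, ?_⟩
          · intro y hy py hpy
            rcases List.mem_append.mp hy with h | h
            · have := ihmin y h py hpy; omega
            · simp at h; subst h; rw [hx] at hpy; injection hpy with h'; omega
          · rw [List.find?_append]
            have h1 : L.find? (fun y => pvFo t y == some p) = none := by
              rw [List.find?_eq_none]
              intro y hy hpred
              simp only [beq_iff_eq] at hpred
              have := ihmin y hy p hpred
              omega
            rw [h1]
            simp [hx]
        · simp only [hlt, if_false]
          refine ⟨?_, ?_⟩
          · intro y hy py hpy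
            rcases List.mem_append.mp hy with h | h
            · exact ihmin y h py hpy
            · simp at h; subst h; rw [hx] at hpy; injection hpy with h'; omega
          · rw [List.find?_append, ihfind]; rfl

theorem pvEmOk_unique (t : List Char) (qs : List (List Char)) (r r' : Option (Nat × List Char))
    (h : PvEmOk t qs r) (h' : PvEmOk t qs r') : r = r' := by
  match r, r' with
  | none, none => rfl
  | none, some (p', q') =>
    exfalso
    obtain ⟨_, hf⟩ := h'
    have hmem := List.mem_of_find?_eq_some hf
    have hpred := List.find?_some hf
    simp only [beq_iff_eq] at hpred
    rw [h q' hmem] at hpred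
    cases hpred
  | some (p, q), none =>
    exfalso
    obtain ⟨_, hf⟩ := h
    have hmem := List.mem_of_find?_eq_some hf
    have hpred := List.find?_some hf
    simp only [beq_iff_eq] at hpred
    rw [h' q hmem] at hpred
    cases hpred
  | some (p, q), some (p', q') =>
    obtain ⟨hmin, hf⟩ := h
    obtain ⟨hmin', hf'⟩ := h'
    have hq := List.find?_some hf
    have hq' := List.find?_some hf'
    simp only [beq_iff_eq] at hq hq'
    have hpp' : p = p' := by
      have h1 := hmin' q (List.mem_of_find?_eq_some hf) p hq
      have h2 := hmin q' (List.mem_of_find?_eq_some hf') p' hq'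
      omega
    subst hpp'
    rw [hf] at hf'
    injection hf' with h''
    rw [h'']

theorem pv_find?_dedup {α : Type} [BEq α] [LawfulBEq α] (qs : List α) (p : α → Bool) :
    (PySem.List.dedup qs).find? p = qs.find? p := by
  induction qs using List.reverseRecOn with
  | nil => simp [PySem.List.dedup_eq_ofList, PySem.Set.ofList_eq_foldl]
  | append_singleton L x ih =>
    rw [PySem.List.dedup_eq_ofList, PySem.Set.ofList_eq_foldl] at *
    rw [List.foldl_append, List.foldl_cons, List.foldl_nil]
    by_cases hmem : x ∈ List.foldl PySem.Set.add [] L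
    · have hadd : PySem.Set.add (List.foldl PySem.Set.add [] L) x
          = List.foldl PySem.Set.add [] L := by
        simp [PySem.Set.add, PySem.Set.contains, hmem]
      rw [hadd, ih, List.find?_append]
      have hxL : x ∈ L := by
        rw [← PySem.Set.ofList_eq_foldl] at hmem
        exact (PySem.Set.mem_ofList L x).mp hmem
      cases hf : L.find? p with
      | some y => rfl
      | none =>
        have : ¬ p x = true := (List.find?_eq_none.mp hf) x hxL
        simp [List.find?, this]
    · have hadd : PySem.Set.add (List.foldl PySem.Set.add [] L) x
          = List.foldl PySem.Set.add [] L ++ [x] := by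
        simp [PySem.Set.add, PySem.Set.contains, hmem]
      rw [hadd, List.find?_append, List.find?_append, ih]

theorem pvEm_dedup (t : List Char) (qs : List (List Char)) :
    pvEm t (PySem.List.dedup qs) = pvEm t qs := by
  apply pvEmOk_unique t qs
  · have h := pvEm_ok t (PySem.List.dedup qs)
    cases hr : pvEm t (PySem.List.dedup qs) with
    | none =>
      rw [hr] at h
      intro q hq
      exact h q ((PySem.List.mem_dedup qs q).mpr hq)
    | some pr =>
      obtain ⟨p, q⟩ := pr
      rw [hr] at h
      obtain ⟨hmin, hf⟩ := h
      refine ⟨?_, ?_⟩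
      · intro q' hq' p' hp'
        exact hmin q' ((PySem.List.mem_dedup qs q').mpr hq') p' hp'
      · rw [← pv_find?_dedup]; exact hf
  · exact pvEm_ok t qs

-- ---- A-side: accept computes the earliest-marker selection ----

theorem pvTryAccept_eq (t q : List Char) :
    pvTryAccept t q
      = (pvFo t q).map (fun p => (t.drop (p + q.length), q, t.take p)) := by
  unfold pvTryAccept pvFo pvFoF
  rw [show ((0 : Nat) : Int) = 0 from rfl, PySem.Chars.findFrom_zero]
  by_cases h : PySem.Chars.find t q = -1
  · simp [h]
  · have hge : 0 ≤ PySem.Chars.find t q := by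
      have hs := PySem.Chars.findFrom_natCast_spec t q 0 (Nat.zero_le _)
      rw [show ((0 : Nat) : Int) = 0 from rfl, PySem.Chars.findFrom_zero] at hs
      exact (hs h).1
    have hlt : ¬ PySem.Chars.find t q < 0 := by omega
    simp only [h, if_false, hlt, Option.map_some]
    rw [PySem.List.slice_from t (by omega), PySem.List.slice_to t hge]
    have htn : (PySem.Chars.find t q + (q.length : Int)).toNat
        = (PySem.Chars.find t q).toNat + q.length := by omega
    rw [htn]

theorem pv_dict_get?_keyed {ν : Type} (v : List Char → ν) (l : List (List Char)) :
    ∀ (d : PySem.Dict (List Char) ν) (k : List Char),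
    (l.foldl (fun d q => d.insert q (v q)) d).get? k
      = if k ∈ l then some (v k) else d.get? k := by
  induction l with
  | nil => intro d k; simp
  | cons q l ih =>
    intro d k
    rw [List.foldl_cons, ih]
    by_cases hkl : k ∈ l
    · simp [hkl, List.mem_cons]
    · by_cases hkq : k = q
      · subst hkq
        simp [hkl]
      · simp [hkl, hkq, PySem.Dict.get?_insert]

theorem pv_items_keyed {ν : Type} (v : List Char → ν) (dflt : ν) (l : List (List Char)) :
    (l.foldl (fun d q => d.insert q (v q)) PySem.Dict.empty).items
      = (PySem.List.dedup l).map (fun q => (q, v q)) := by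
  have hnd : (l.foldl (fun d q => d.insert q (v q)) PySem.Dict.empty).keys.Nodup :=
    PySem.Dict.nodup_keys_foldl_insert l (fun _ q => v q) _ PySem.Dict.nodup_keys_empty
  rw [PySem.Dict.items_eq_map_keys _ hnd dflt]
  have hkeys : (l.foldl (fun d q => d.insert q (v q)) PySem.Dict.empty).keys
      = PySem.List.dedup l := by
    rw [PySem.Dict.keys_foldl_insert l (fun _ q => v q) PySem.Dict.empty,
      PySem.Dict.keys_empty,
      show ([] : List (List Char)) = PySem.Set.empty from rfl,
      PySem.Set.update_empty, ← PySem.List.dedup_eq_ofList]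
  rw [hkeys]
  apply List.map_congr_left
  intro k hk
  have hkl : k ∈ l := (PySem.List.mem_dedup l k).mp hk
  have hget := pv_dict_get?_keyed v l PySem.Dict.empty k
  rw [if_pos hkl] at hget
  rw [PySem.Dict.getD_of_get?_eq_some _ dflt hget]

theorem pv_afold (t : List Char) (L : List (List Char)) :
    (L.map (fun q => (q, pvTryAccept t q))).foldl pvAcceptStep (none, none, none)
      = ((pvEm t L).map (·.1),
         (pvEm t L).map (fun pr => some (t.drop (pr.1 + pr.2.length), pr.2, t.take pr.1)),
         L.getLast?.map (fun q => pvTryAccept t q)) := by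
  induction L using List.reverseRecOn with
  | nil => simp [pvEm]
  | append_singleton L x ih =>
    rw [List.map_append, List.foldl_append, ih]
    simp only [List.map_cons, List.map_nil, List.foldl_cons, List.foldl_nil]
    rw [List.getLast?_concat]
    have hem : pvEm t (L ++ [x]) = pvEmStep t (pvEm t L) x := by
      unfold pvEm; rw [List.foldl_append, List.foldl_cons, List.foldl_nil]
    rw [hem]
    unfold pvAcceptStep pvEmStep
    simp only [pvTryAccept_eq]
    cases hx : pvFo t x with
    | none => cases hL : pvEm t L <;> simp [hx]
    | some p =>
      have hlen : (t.take p).length = p := by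
        have := pvFo_le t x p hx
        simp [List.length_take]; omega
      cases hL : pvEm t L with
      | none => simp [hx, hlen]
      | some pr =>
        obtain ⟨p', q'⟩ := pr
        by_cases hlt : p < p'
        · simp [hx, hlen, hlt]
        · simp [hx, hlen, hlt]

theorem pvAccept_eq (t : List Char) (qs : List (List Char)) (h : qs ≠ []) :
    pvAccept t qs
      = some ((pvEm t qs).map
          (fun pr => (t.drop (pr.1 + pr.2.length), pr.2, t.take pr.1))) := by
  match qs with
  | [] => exact absurd rfl h
  | [q] =>
    show some (pvTryAccept t q) = _
    rw [pvTryAccept_eq]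
    have hem : pvEm t [q] = pvEmStep t none q := by
      unfold pvEm; rw [List.foldl_cons, List.foldl_nil]
    rw [hem]
    unfold pvEmStep
    cases hx : pvFo t q <;> simp
  | a :: b :: l =>
    show (let results := (a :: b :: l).foldl (fun d q => d.insert q (pvTryAccept t q)) PySem.Dict.empty
          let st := results.items.foldl pvAcceptStep (none, none, none)
          match st.2.1 with
          | some v => some v
          | none => st.2.2) = _
    simp only [pv_items_keyed (fun q => pvTryAccept t q) none, pv_afold]
    rw [pvEm_dedup]
    cases hem : pvEm t (a :: b :: l) with
    | some pr => simp
    | none =>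
      simp only [Option.map_none]
      have hok := pvEm_ok t (PySem.List.dedup (a :: b :: l))
      rw [pvEm_dedup, hem] at hok
      have hne : PySem.List.dedup (a :: b :: l) ≠ [] := by
        intro hcon
        have : a ∈ PySem.List.dedup (a :: b :: l) :=
          (PySem.List.mem_dedup _ a).mpr (by simp)
        rw [hcon] at this
        simp at this
      cases hd : (PySem.List.dedup (a :: b :: l)).getLast? with
      | none => exact absurd (List.getLast?_eq_none_iff.mp hd) hne
      | some y =>
        have hy : y ∈ PySem.List.dedup (a :: b :: l) := List.mem_of_getLast? hd
        have hfo : pvFo t y = none := hok y hy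
        simp [pvTryAccept_eq, hfo]

-- ---- B-side: the cached scan computes the same earliest-marker selection ----

/-- the value B's cached lookup must produce for marker `q` at scan position `i`. -/
def pvVal (t : List Char) (n i : Nat) (q : List Char) : Int :=
  match pvFoF t i q with
  | none => (n : Int) + 1
  | some m => (m : Int)

/-- cache invariant: every stored entry is the `n+1` "absent" sentinel, stale (`< i`),
    or the first occurrence at or after `i`. -/
def PvInv (t : List Char) (n i : Nat) (nxt : PySem.Dict (List Char) Int) : Prop :=
  ∀ q p, nxt.get? q = some p →
    (p = (n : Int) + 1 ∧ pvFoF t i q = none) ∨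
    (0 ≤ p ∧ p < (i : Int)) ∨
    (∃ m : Nat, pvFoF t i q = some m ∧ p = (m : Int))

theorem PvInv_empty (t : List Char) (n i : Nat) : PvInv t n i PySem.Dict.empty := by
  intro q p h
  rw [PySem.Dict.get?_empty] at h
  cases h

theorem PvInv_mono (t : List Char) (n i i' : Nat) (nxt : PySem.Dict (List Char) Int)
    (hii' : i ≤ i') (hi' : i' ≤ t.length) (h : PvInv t n i nxt) : PvInv t n i' nxt := by
  intro q p hq
  rcases h q p hq with ⟨hp, hfo⟩ | ⟨h0, hlt⟩ | ⟨m, hfo, hp⟩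
  · left
    refine ⟨hp, ?_⟩
    rw [pvFoF_none_iff t q i' hi']
    intro j hj
    exact (pvFoF_none_iff t q i (le_trans hii' hi')).mp hfo j (le_trans hii' hj)
  · right; left
    constructor
    · exact h0
    · have : (i : Int) ≤ (i' : Int) := by exact_mod_cast hii'
      omega
  · obtain ⟨him, hocc, hmin⟩ := pvFoF_some_spec t q i m (le_trans hii' hi') hfo
    by_cases hmi' : m < i'
    · right; left
      constructor
      · omega
      · rw [hp]; exact_mod_cast hmi'
    · right; right
      refine ⟨m, ?_, hp⟩
      rw [pvFoF_some_iff t q i' m hi']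
      exact ⟨by omega, hocc, fun j hj1 hj2 => hmin j (by omega) hj2⟩

theorem pvFindNext_eq (t : List Char) (n i : Nat) (nxt : PySem.Dict (List Char) Int)
    (hInv : PvInv t n i nxt) (q : List Char) :
    ∃ nxt', pvFindNext t n nxt (i : Int) q = (pvVal t n i q, nxt') ∧ PvInv t n i nxt' := by
  unfold pvFindNext
  by_cases hst : nxt.getD q (-1) < (i : Int)
  · have hp2 : (if PySem.Chars.findFrom t q (i : Int) none < 0
        then (n : Int) + 1 else PySem.Chars.findFrom t q (i : Int) none) = pvVal t n i q := by
      unfold pvVal pvFoF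
      by_cases hr : PySem.Chars.findFrom t q (i : Int) none < 0
      · simp [hr]
      · simp only [hr, if_false]
        omega
    refine ⟨nxt.insert q (pvVal t n i q), ?_, ?_⟩
    · simp only [hst, if_true, hp2]
    · intro q' p' hq'
      rw [PySem.Dict.get?_insert] at hq'
      by_cases hqq : q' = q
      · rw [if_pos hqq] at hq'
        injection hq' with hq'
        unfold pvVal at hq'
        cases hfo : pvFoF t i q with
        | none =>
          rw [hfo] at hq'
          left; exact ⟨hq'.symm, hqq ▸ hfo⟩
        | some m =>
          rw [hfo] at hq'
          right; right; exact ⟨m, hqq ▸ hfo, hq'.symm⟩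
      · rw [if_neg hqq] at hq'
        exact hInv q' p' hq'
  · refine ⟨nxt, ?_, hInv⟩
    rw [if_neg hst]
    cases hg : nxt.get? q with
    | none =>
      exfalso
      rw [PySem.Dict.getD_of_get?_eq_none nxt (-1) hg] at hst
      have : (0 : Int) ≤ (i : Int) := by positivity
      omega
    | some p =>
      have hp0 : nxt.getD q (-1) = p := PySem.Dict.getD_of_get?_eq_some nxt (-1) hg
      rw [hp0] at hst ⊢
      rcases hInv q p hg with ⟨hp, hfo⟩ | ⟨h0, hlt⟩ | ⟨m, hfo, hp⟩
      · unfold pvVal; rw [hfo, hp]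
      · exact absurd hlt hst
      · unfold pvVal; rw [hfo, hp]

theorem pvEarliest_fold (t : List Char) (n i : Nat) (hn : n = t.length) (hi : i ≤ t.length)
    (qs : List (List Char)) :
    ∀ (nxt0 : PySem.Dict (List Char) Int) (acc0 : Option (Nat × List Char)) (b : Int)
      (bq : Option (List Char)),
      PvInv t n i nxt0 →
      (match acc0 with
       | none => b = (n : Int) + 1 ∧ bq = none
       | some pr => b = ((pr.1 + i : Nat) : Int) ∧ bq = some pr.2 ∧ pr.1 + i ≤ n) →
      ∃ nxt', qs.foldl (fun st q =>
          let (nxt, best, bestq) := st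
          let (p, nxt') := pvFindNext t n nxt i q
          if p < best then (nxt', p, some q) else (nxt', best, bestq)) (nxt0, b, bq)
        = (nxt',
           match qs.foldl (pvEmStep (t.drop i)) acc0 with
           | none => ((n : Int) + 1, none)
           | some pr => (((pr.1 + i : Nat) : Int), some pr.2))
        ∧ PvInv t n i nxt' := by
  induction qs with
  | nil =>
    intro nxt0 acc0 b bq hInv hrel
    refine ⟨nxt0, ?_, hInv⟩
    rw [List.foldl_nil, List.foldl_nil]
    cases acc0 with
    | none => obtain ⟨hb, hbq⟩ := hrel; rw [hb, hbq]
    | some pr => obtain ⟨hb, hbq, _⟩ := hrel; rw [hb, hbq]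
  | cons q qs ih =>
    intro nxt0 acc0 b bq hInv hrel
    rw [List.foldl_cons, List.foldl_cons]
    obtain ⟨nxt1, hfn, hInv1⟩ := pvFindNext_eq t n i nxt0 hInv q
    simp only [hfn]
    cases hfo : pvFo (t.drop i) q with
    | none =>
      have hval : pvVal t n i q = (n : Int) + 1 := by
        unfold pvVal
        rw [pvFoF_drop t q i hi, hfo]
        rfl
      have hnew : pvEmStep (t.drop i) acc0 q = acc0 := by
        unfold pvEmStep; rw [hfo]
      rw [hnew]
      have hnlt : ¬ pvVal t n i q < b := by
        cases acc0 with
        | none => obtain ⟨hb, _⟩ := hrel; rw [hb, hval]; omega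
        | some pr =>
          obtain ⟨hb, _, hle⟩ := hrel
          rw [hb, hval]
          have : ((pr.1 + i : Nat) : Int) ≤ (n : Int) := by exact_mod_cast hle
          omega
      rw [if_neg hnlt]
      exact ih nxt1 acc0 b bq hInv1 hrel
    | some p0 =>
      have hval : pvVal t n i q = ((p0 + i : Nat) : Int) := by
        unfold pvVal
        rw [pvFoF_drop t q i hi, hfo]
        rfl
      have hle0 : p0 + q.length + i ≤ t.length := by
        have := pvFo_le (t.drop i) q p0 hfo
        rw [List.length_drop] at this
        omega
      cases acc0 with
      | none =>
        obtain ⟨hb, hbq⟩ := hrel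
        have hlt : pvVal t n i q < b := by
          rw [hb, hval]
          have : ((p0 + i : Nat) : Int) ≤ (n : Int) := by
            subst hn; exact_mod_cast by omega
          omega
        rw [if_pos hlt]
        have hnew : pvEmStep (t.drop i) none q = some (p0, q) := by
          unfold pvEmStep; rw [hfo]
        rw [hnew]
        apply ih nxt1 (some (p0, q)) _ _ hInv1
        exact ⟨hval, rfl, by omega⟩
      | some pr =>
        obtain ⟨hb, hbq, hle⟩ := hrel
        have hnew : pvEmStep (t.drop i) (some pr) q
            = if p0 < pr.1 then some (p0, q) else some pr := by
          unfold pvEmStep; rw [hfo]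
        by_cases hlt : p0 < pr.1
        · have hblt : pvVal t n i q < b := by
            rw [hb, hval]
            exact_mod_cast by omega
          rw [if_pos hblt, hnew, if_pos hlt]
          apply ih nxt1 (some (p0, q)) _ _ hInv1
          exact ⟨hval, rfl, by omega⟩
        · have hbge : ¬ pvVal t n i q < b := by
            rw [hb, hval]
            have : ((pr.1 + i : Nat) : Int) ≤ ((p0 + i : Nat) : Int) := by
              exact_mod_cast by omega
            omega
          rw [if_neg hbge, hnew, if_neg hlt]
          exact ih nxt1 (some pr) b bq hInv1 ⟨hb, hbq, hle⟩
  
theorem pvEarliest_eq (t : List Char) (n i : Nat) (nxt : PySem.Dict (List Char) Int)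
    (hn : n = t.length) (hi : i ≤ t.length) (hInv : PvInv t n i nxt)
    (qs : List (List Char)) :
    ∃ nxt', pvEarliest t n (i : Int) qs nxt
        = (nxt',
           match pvEm (t.drop i) qs with
           | none => ((n : Int) + 1, none)
           | some pr => (((pr.1 + i : Nat) : Int), some pr.2))
      ∧ PvInv t n i nxt' := by
  unfold pvEarliest pvEm
  exact pvEarliest_fold t n i hn hi qs nxt none ((n : Int) + 1) none hInv ⟨rfl, rfl⟩

theorem pvEm_mem (t : List Char) (qs : List (List Char)) (p : Nat) (q : List Char)
    (h : pvEm t qs = some (p, q)) : q ∈ qs ∧ pvFo t q = some p := by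
  have hok := pvEm_ok t qs
  rw [h] at hok
  obtain ⟨_, hf⟩ := hok
  refine ⟨List.mem_of_find?_eq_some hf, ?_⟩
  have := List.find?_some hf
  simpa using this

-- ---- the simulation: A's stack machine ≡ B's index scan ----

theorem pv_stack_last (d : Nat) :
    (PyStates.OUTSIDE :: List.replicate d PyStates.IN_SQ).getLast?
      = some (if d = 0 then PyStates.OUTSIDE else PyStates.IN_SQ) := by
  cases d with
  | zero => rfl
  | succ k =>
    rw [List.replicate_succ',
      show PyStates.OUTSIDE :: (List.replicate k PyStates.IN_SQ ++ [PyStates.IN_SQ])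
        = (PyStates.OUTSIDE :: List.replicate k PyStates.IN_SQ) ++ [PyStates.IN_SQ] from rfl,
      List.getLast?_concat]
    simp

theorem pv_sim (t : List Char) (preL beginL endL : List (List Char))
    (hpre : preL ≠ []) (hbb : beginL ++ endL ≠ [])
    (hne : ∀ q ∈ preL ++ (beginL ++ endL), q ≠ ([] : List Char)) :
    ∀ fa fb i d (nxt : PySem.Dict (List Char) Int) (acc : List Char),
      i ≤ t.length → PvInv t t.length i nxt →
      t.length - i + 2 ≤ fa → t.length - i + 2 ≤ fb →
      pvALoop preL beginL endL fa (t.drop i)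
        (PyStates.OUTSIDE :: List.replicate d PyStates.IN_SQ) acc
      = pvBLoop t t.length preL (beginL ++ endL) (PySem.Set.ofList beginL) fb
          (i : Int) d nxt acc := by
  intro fa
  induction fa with
  | zero =>
    intro fb i d nxt acc _ _ hfa _
    omega
  | succ fa ih =>
    intro fb i d nxt acc hi hInv hfa hfb
    cases fb with
    | zero => omega
    | succ fb =>
    cases d with
    | zero =>
      obtain ⟨nxt', hEar, hInv'⟩ := pvEarliest_eq t t.length i nxt rfl hi hInv preL
      rw [show List.replicate 0 PyStates.IN_SQ = [] from rfl]
      simp only [pvALoop, pvBLoop]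
      rw [show ([PyStates.OUTSIDE] : List PyStates).getLast? = some PyStates.OUTSIDE from rfl]
      rw [pvAccept_eq (t.drop i) preL hpre]
      cases hem : pvEm (t.drop i) preL with
      | none =>
        rw [hem] at hEar
        simp only [hEar, Option.map_none]
        have hlt : (t.length : Int) < (t.length : Int) + 1 := by omega
        rw [if_pos hlt]
        cases fa with
        | zero => omega
        | succ fa2 =>
          simp only [pvALoop]
          rw [show ([PyStates.OUTSIDE] ++ [PyStates.ACCEPT] : List PyStates).getLast?
            = some PyStates.ACCEPT from rfl]
          rw [PySem.List.slice_from_natCast]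
          rfl
      | some pr =>
        obtain ⟨p0, q⟩ := pr
        obtain ⟨hqmem, hfo⟩ := pvEm_mem (t.drop i) preL p0 q hem
        have hqne : q ≠ ([] : List Char) := hne q (List.mem_append_left _ hqmem)
        have hqlen : 0 < q.length := List.length_pos_of_ne_nil hqne
        have hlen : p0 + q.length ≤ t.length - i := by
          have := pvFo_le (t.drop i) q p0 hfo
          rwa [List.length_drop] at this
        rw [hem] at hEar
        simp only [hEar, Option.map_some]
        have hnlt : ¬ (t.length : Int) < ((p0 + i : Nat) : Int) := by
          have : p0 + i ≤ t.length := by omega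
          exact_mod_cast not_lt.mpr (by exact_mod_cast this)
        rw [if_neg hnlt]
        have hcast : ((p0 + i : Nat) : Int) + (q.length : Int)
            = ((i + (p0 + q.length) : Nat) : Int) := by push_cast; ring
        rw [hcast]
        have hslice : PySem.List.slice t (some (i : Int)) (some ((p0 + i : Nat) : Int))
            = (t.drop i).take p0 := by
          rw [show ((p0 + i : Nat) : Int) = (i : Int) + (p0 : Int) from by push_cast; ring]
          exact PySem.List.slice_natCast_add t i p0
        rw [hslice, List.drop_drop]
        exact ih fb (i + (p0 + q.length)) 1 nxt' (acc ++ (t.drop i).take p0)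
          (by omega)
          (PvInv_mono t t.length i (i + (p0 + q.length)) nxt' (by omega) (by omega) hInv')
          (by omega) (by omega)
    | succ k =>
      obtain ⟨nxt', hEar, hInv'⟩ := pvEarliest_eq t t.length i nxt rfl hi hInv (beginL ++ endL)
      simp only [pvALoop, pvBLoop]
      rw [pv_stack_last]
      rw [show (if k + 1 = 0 then PyStates.OUTSIDE else PyStates.IN_SQ) = PyStates.IN_SQ
        from by simp]
      rw [pvAccept_eq (t.drop i) (beginL ++ endL) hbb]
      rw [if_neg (show ¬ (k + 1 = 0) by omega)]
      cases hem : pvEm (t.drop i) (beginL ++ endL) with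
      | none =>
        rw [hem] at hEar
        simp only [hEar]
        have hlt : (t.length : Int) < (t.length : Int) + 1 := by omega
        rw [if_pos hlt, PySem.List.slice_from_natCast]
        rfl
      | some pr =>
        obtain ⟨p0, q⟩ := pr
        obtain ⟨hqmem, hfo⟩ := pvEm_mem (t.drop i) (beginL ++ endL) p0 q hem
        have hqne : q ≠ ([] : List Char) := hne q (List.mem_append_right _ hqmem)
        have hqlen : 0 < q.length := List.length_pos_of_ne_nil hqne
        have hlen : p0 + q.length ≤ t.length - i := by
          have := pvFo_le (t.drop i) q p0 hfo
          rwa [List.length_drop] at this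
        rw [hem] at hEar
        simp only [hEar, Option.map_some]
        have hnlt : ¬ (t.length : Int) < ((p0 + i : Nat) : Int) := by
          have : p0 + i ≤ t.length := by omega
          exact_mod_cast not_lt.mpr (by exact_mod_cast this)
        rw [if_neg hnlt]
        have hcast : ((p0 + i : Nat) : Int) + (q.length : Int)
            = ((i + (p0 + q.length) : Nat) : Int) := by push_cast; ring
        rw [hcast, List.drop_drop]
        by_cases hqb : q ∈ beginL
        · have hcont : PySem.Set.contains (PySem.Set.ofList beginL) q = true := by
            simp [PySem.Set.contains]; exact hqb
          rw [if_pos hqb]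
          simp only [hcont, if_true]
          have hstk : (PyStates.OUTSIDE :: List.replicate (k + 1) PyStates.IN_SQ)
              ++ [PyStates.IN_SQ]
              = PyStates.OUTSIDE :: List.replicate (k + 1 + 1) PyStates.IN_SQ := by
            rw [show List.replicate (k + 1 + 1) PyStates.IN_SQ
              = List.replicate (k + 1) PyStates.IN_SQ ++ [PyStates.IN_SQ]
              from List.replicate_succ']
            simp
          rw [hstk]
          exact ih fb (i + (p0 + q.length)) (k + 1 + 1) nxt' acc
            (by omega)
            (PvInv_mono t t.length i (i + (p0 + q.length)) nxt' (by omega) (by omega) hInv')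
            (by omega) (by omega)
        · have hqe : q ∈ endL := by
            rcases List.mem_append.mp hqmem with h | h
            · exact absurd h hqb
            · exact h
          have hcont : PySem.Set.contains (PySem.Set.ofList beginL) q = false := by
            simp [PySem.Set.contains]; exact hqb
          rw [if_neg hqb, if_pos hqe]
          simp only [hcont, Bool.false_eq_true, if_false]
          have hstk : (PyStates.OUTSIDE :: List.replicate (k + 1) PyStates.IN_SQ).dropLast
              = PyStates.OUTSIDE :: List.replicate k PyStates.IN_SQ := by
            rw [List.replicate_succ',
              show PyStates.OUTSIDE :: (List.replicate k PyStates.IN_SQ ++ [PyStates.IN_SQ])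
                = (PyStates.OUTSIDE :: List.replicate k PyStates.IN_SQ) ++ [PyStates.IN_SQ]
                from rfl,
              List.dropLast_concat]
          rw [hstk, Nat.add_sub_cancel]
          exact ih fb (i + (p0 + q.length)) k nxt' acc
            (by omega)
            (PvInv_mono t t.length i (i + (p0 + q.length)) nxt' (by omega) (by omega) hInv')
            (by omega) (by omega)

theorem pv_fo_none_of_isIn (text s : String) (h : PySem.Str.isIn s text = false) :
    pvFo text.toList s.toList = none := by
  have hfind : PySem.Chars.find text.toList s.toList = -1 := by
    rw [PySem.Chars.find_eq_neg_one_iff]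
    intro hin
    rw [PySem.Str.isIn_eq] at h
    rw [(PySem.Chars.isIn_iff_infix s.toList text.toList).mpr hin] at h
    cases h
  unfold pvFo pvFoF
  rw [show ((0 : Nat) : Int) = 0 from rfl, PySem.Chars.findFrom_zero, hfind]
  rfl

-- the no-opening-marker case: both programs return the text unchanged in one step
theorem pv_noopen (t : List Char) (preL beginL endL : List (List Char))
    (hpre : preL ≠ []) (hfo : ∀ q ∈ preL, pvFo t q = none) :
    pvALoop preL beginL endL (t.length + 2) t [PyStates.OUTSIDE] []
      = pvBLoop t t.length preL (beginL ++ endL) (PySem.Set.ofList beginL)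
          (t.length + 2) ((0 : Nat) : Int) 0 PySem.Dict.empty [] := by
  have hem : pvEm t preL = none :=
    pvEmOk_unique t preL (pvEm t preL) none (pvEm_ok t preL) hfo
  obtain ⟨nxt', hEar, _⟩ :=
    pvEarliest_eq t t.length 0 PySem.Dict.empty rfl (Nat.zero_le _) (PvInv_empty _ _ _) preL
  rw [List.drop_zero, hem] at hEar
  rw [show t.length + 2 = (t.length + 1) + 1 from rfl]
  simp only [pvALoop, pvBLoop]
  rw [show ([PyStates.OUTSIDE] : List PyStates).getLast? = some PyStates.OUTSIDE from rfl]
  rw [pvAccept_eq t preL hpre, hem]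
  simp only [hEar, Option.map_none]
  have hlt : (t.length : Int) < (t.length : Int) + 1 := by omega
  rw [if_pos hlt]
  rw [show ([PyStates.OUTSIDE] ++ [PyStates.ACCEPT] : List PyStates).getLast?
    = some PyStates.ACCEPT from rfl]
  rw [PySem.List.slice_from_natCast, List.drop_zero]
  rfl

-- ===== VERDICT (by name: the statements are the Claim_ definitions above) =====
theorem recursive_clean_spec : Claim_equal_recursive_clean := by
  intro text begin end_ pre _ hPre
  unfold Spec_recursive_clean
  obtain ⟨h1, hdisj⟩ := hPre
  have hpreL : (pvEffPre begin pre).map String.toList ≠ [] := by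
    simpa [List.map_eq_nil_iff] using h1
  rcases hdisj with hno | ⟨h2, h3, h4, h5⟩
  · have hfo : ∀ q ∈ (pvEffPre begin pre).map String.toList, pvFo text.toList q = none := by
      intro q hq
      obtain ⟨s, hs, rfl⟩ := List.mem_map.mp hq
      exact pv_fo_none_of_isIn text s (hno s hs)
    simp only [recursive_clean, recursive_clean_alt]
    exact congrArg String.ofList (pv_noopen text.toList
      ((pvEffPre begin pre).map String.toList)
      (begin.map String.toList) (end_.map String.toList) hpreL hfo)
  ·
    have hbbL : begin.map String.toList ++ end_.map String.toList ≠ [] := by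
      intro hc
      obtain ⟨hcb, hce⟩ := List.append_eq_nil_iff.mp hc
      exact h2 (by rw [List.map_eq_nil_iff.mp hcb, List.map_eq_nil_iff.mp hce]; rfl)
    have hneL : ∀ q ∈ (pvEffPre begin pre).map String.toList
        ++ (begin.map String.toList ++ end_.map String.toList), q ≠ ([] : List Char) := by
      intro q hq
      rcases List.mem_append.mp hq with h | h
      · obtain ⟨s, hs, rfl⟩ := List.mem_map.mp h
        simpa [String.toList_eq_nil_iff] using h5 s hs
      · rcases List.mem_append.mp h with h' | h'
        · obtain ⟨s, hs, rfl⟩ := List.mem_map.mp h'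
          simpa [String.toList_eq_nil_iff] using h3 s hs
        · obtain ⟨s, hs, rfl⟩ := List.mem_map.mp h'
          simpa [String.toList_eq_nil_iff] using h4 s hs
    have hsim := pv_sim text.toList
      ((pvEffPre begin pre).map String.toList)
      (begin.map String.toList) (end_.map String.toList)
      hpreL hbbL hneL
      (text.toList.length + 2) (text.toList.length + 2) 0 0 PySem.Dict.empty []
      (Nat.zero_le _) (PvInv_empty _ _ _) (by omega) (by omega)
    simp only [List.drop_zero, Nat.cast_zero, List.replicate] at hsim
    simp only [recursive_clean, recursive_clean_alt]
    rw [hsim]
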